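-- pv_equiv track=rewrite | github.com/cheese1010/whulib | Social Computing/期末报告/GN.py | bfs
-- ===== SOURCE A (Python) =====
-- def bfs(visited,e_lst,v):
--     # bfs
--     community = []
--     queue = []
--
--     queue.append(v)
--     visited.append(v)
--     community.append(v)
--
--     while(len(queue) != 0):
--         v = queue.pop(0)
--         for edge in e_lst:
--             if edge[0] == v and (edge[1] not in visited):
--                 visited.append(edge[1])
--                 queue.append(edge[1])
--                 community.append(edge[1])
--
--             if edge[1] == v and (edge[0] not in visited):
--                 visited.append(edge[0])
--                 queue.append(edge[0])
--                 community.append(edge[0])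
--
--     return community
-- ===== SOURCE B (Python) =====
-- def bfs(visited, e_lst, v):
--     # Adjacency-index BFS: build a neighbor dict in one pass over e_lst, then
--     # expand using a visited set and a head pointer over the community list.
--     # Mutates `visited` the same way A does (appends newly reached nodes).
--     adj = {}
--     for a, b in e_lst:
--         adj.setdefault(a, []).append(b)
--         adj.setdefault(b, []).append(a)
--
--     seen = set(visited)
--     seen.add(v)
--     visited.append(v)
--     community = [v]
--     head = 0
--     while head < len(community):
--         u = community[head]
--         head += 1
--         for w in adj.get(u, []):
--             if w not in seen:
--                 seen.add(w)
--                 visited.append(w)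
--                 community.append(w)
--     return community
-- ===== Notes on version B (the rewrite author's own statement) =====
-- stated objective: alternative
-- what changed: Replaced the per-dequeue rescan of the whole edge list and list-based 'not in visited' checks by a one-pass adjacency dict, a hash visited-set and a head-pointer queue instead of pop(0).
import Mathlib
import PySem

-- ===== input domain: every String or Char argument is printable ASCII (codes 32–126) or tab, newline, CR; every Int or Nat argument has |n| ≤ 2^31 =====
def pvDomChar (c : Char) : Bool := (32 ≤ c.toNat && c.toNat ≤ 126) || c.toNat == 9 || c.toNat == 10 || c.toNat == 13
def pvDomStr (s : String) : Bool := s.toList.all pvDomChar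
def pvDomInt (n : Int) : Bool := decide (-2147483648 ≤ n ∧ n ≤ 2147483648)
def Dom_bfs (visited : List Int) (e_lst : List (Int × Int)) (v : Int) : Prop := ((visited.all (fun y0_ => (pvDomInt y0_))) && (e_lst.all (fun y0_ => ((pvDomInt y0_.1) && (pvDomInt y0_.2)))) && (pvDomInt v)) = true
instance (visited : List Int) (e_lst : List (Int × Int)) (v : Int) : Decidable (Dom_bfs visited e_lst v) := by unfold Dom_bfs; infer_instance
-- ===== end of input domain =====

-- B replaces A's per-dequeue rescan of the edge list by an adjacency dict + visited set + head-pointer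
-- queue (objective: alternative). Python A mutates `visited` in place; B performs the same mutation;
-- the equivalence proved here is about the RETURN value (the community list).

-- Termination helpers, cited by the ports' decreasing_by: number of pool elements not yet visited.
def pvCnt (pool vis : List Int) : Nat := (pool.filter (fun x => decide (x ∉ vis))).length

theorem pvCnt_append_lt (pool vis : List Int) (x : Int) (hx : x ∈ pool) (hnx : x ∉ vis) :
    pvCnt pool (vis ++ [x]) < pvCnt pool vis := by
  have hsub : List.Sublist (pool.filter (fun y => decide (y ∉ vis ++ [x])))
      (pool.filter (fun y => decide (y ∉ vis))) := by
    apply List.monotone_filter_right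
    intro a ha
    simp only [decide_eq_true_eq, List.mem_append] at ha ⊢
    exact fun hmem => ha (Or.inl hmem)
  refine Nat.lt_of_le_of_ne hsub.length_le ?_
  intro hlen
  have heq := hsub.eq_of_length hlen
  have hx1 : x ∈ pool.filter (fun y => decide (y ∉ vis)) := by
    simp only [List.mem_filter, decide_eq_true_eq]; exact ⟨hx, hnx⟩
  rw [← heq] at hx1
  simp [List.mem_filter] at hx1

-- the neighbour sequence A's edge scan at node v touches (in edge order); used by the termination
-- arguments of both ports and by the equivalence proof below
def nbrsOf (v : Int) (l : List (Int × Int)) : List Int :=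
  l.flatMap (fun e => (if e.1 = v then [e.2] else []) ++ (if e.2 = v then [e.1] else []))

-- A's per-neighbour action, once the edge scan is flattened
def stepA (s : List Int × List Int × List Int) (w : Int) : List Int × List Int × List Int :=
  if ¬ w ∈ s.1 then (s.1 ++ [w], s.2.1 ++ [w], s.2.2 ++ [w]) else s

theorem foldSA_measure (pool : List Int) :
    ∀ (nl : List Int) (s : List Int × List Int × List Int), (∀ w ∈ nl, w ∈ pool) →
      2 * pvCnt pool (nl.foldl stepA s).1 + (nl.foldl stepA s).2.1.length ≤
        2 * pvCnt pool s.1 + s.2.1.length := by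
  intro nl
  induction nl with
  | nil => intro s _; exact le_refl _
  | cons w nl ih =>
    intro s hmem
    simp only [List.foldl_cons]
    refine le_trans (ih _ (fun x hx => hmem x (List.mem_cons_of_mem _ hx))) ?_
    unfold stepA
    by_cases h : w ∈ s.1
    · simp [h]
    · have := pvCnt_append_lt pool s.1 w (hmem w List.mem_cons_self) h
      simp only [h, not_false_iff, if_pos, List.length_append, List.length_cons, List.length_nil]
      omega

-- ===== PORT A =====
-- the body of A's `while` loop's `for edge in e_lst`: the two sequential `if`s
def bfsStep (v : Int) (s : List Int × List Int × List Int) (e : Int × Int) :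
    List Int × List Int × List Int :=
  let s1 := if e.1 = v ∧ ¬ e.2 ∈ s.1 then (s.1 ++ [e.2], s.2.1 ++ [e.2], s.2.2 ++ [e.2]) else s
  if e.2 = v ∧ ¬ e.1 ∈ s1.1 then (s1.1 ++ [e.1], s1.2.1 ++ [e.1], s1.2.2 ++ [e.1]) else s1

-- flattening A's edge scan (cited by bfsLoop's decreasing_by and by the equivalence proof)
theorem bfsStep_eq_foldA (v : Int) (s : List Int × List Int × List Int) (e : Int × Int) :
    bfsStep v s e =
      ((if e.1 = v then [e.2] else []) ++ (if e.2 = v then [e.1] else [])).foldl stepA s := by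
  obtain ⟨a, b⟩ := e
  by_cases h1 : a = v <;> by_cases h2 : b = v
  · by_cases hm : b ∈ s.1
    · simp [bfsStep, stepA, h1, h2, hm]
    · simp [bfsStep, stepA, h1, h2, hm, List.mem_append]
  · by_cases hm : b ∈ s.1 <;> simp [bfsStep, stepA, h1, h2, hm]
  · by_cases hm : a ∈ s.1 <;> simp [bfsStep, stepA, h1, h2, hm]
  · simp [bfsStep, stepA, h1, h2]

theorem foldA_eq (v : Int) :
    ∀ (l : List (Int × Int)) (s : List Int × List Int × List Int),
      l.foldl (bfsStep v) s = (nbrsOf v l).foldl stepA s := by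
  intro l
  induction l with
  | nil => intro s; simp [nbrsOf]
  | cons e l ih =>
    intro s
    have hn : nbrsOf v (e :: l) =
        ((if e.1 = v then [e.2] else []) ++ (if e.2 = v then [e.1] else [])) ++ nbrsOf v l := by
      simp [nbrsOf]
    rw [List.foldl_cons, ih (bfsStep v s e), bfsStep_eq_foldA, hn]
    simp only [List.foldl_append]

def poolA (e_lst : List (Int × Int)) : List Int := e_lst.flatMap (fun e => [e.1, e.2])

theorem mem_nbrsOf_pool (v : Int) (l : List (Int × Int)) :
    ∀ w ∈ nbrsOf v l, w ∈ poolA l := by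
  intro w hw
  simp only [nbrsOf, List.mem_flatMap] at hw
  obtain ⟨e, he, hwe⟩ := hw
  simp only [poolA, List.mem_flatMap]
  refine ⟨e, he, ?_⟩
  rcases List.mem_append.mp hwe with h | h <;>
    [skip; skip] <;> split at h <;> simp_all

-- A's while loop: state (visited, queue, community); pop(0) = match on the queue head
def bfsLoop (e_lst : List (Int × Int)) (vis q com : List Int) : List Int :=
  match q with
  | [] => com
  | v :: qt =>
    let s := e_lst.foldl (bfsStep v) (vis, qt, com)
    bfsLoop e_lst s.1 s.2.1 s.2.2
termination_by 2 * pvCnt (poolA e_lst) vis + q.length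
decreasing_by
  have h : 2 * pvCnt (poolA e_lst) (e_lst.foldl (bfsStep v) (vis, qt, com)).1 +
      (e_lst.foldl (bfsStep v) (vis, qt, com)).2.1.length ≤
      2 * pvCnt (poolA e_lst) vis + qt.length := by
    rw [foldA_eq]
    exact foldSA_measure (poolA e_lst) (nbrsOf v e_lst) (vis, qt, com) (mem_nbrsOf_pool v e_lst)
  simp only [List.length_cons, List.foldl_attach] at *
  omega

def bfs (visited : List Int) (e_lst : List (Int × Int)) (v : Int) : List Int :=
  bfsLoop e_lst (visited ++ [v]) [v] [v]

-- ===== PORT B =====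
-- adj.setdefault(a, []).append(b)  ≡  adj[a] = adj.get(a, []) + [b]  (Dict.modify)
def adjBuild (e_lst : List (Int × Int)) : PySem.Dict Int (List Int) :=
  e_lst.foldl
    (fun d e => (d.modify e.1 [] (fun l => l ++ [e.2])).modify e.2 [] (fun l => l ++ [e.1]))
    PySem.Dict.empty

-- the body of B's `for w in adj.get(u, [])`: state (seen, community)
def stepB (p : List Int × List Int) (w : Int) : List Int × List Int :=
  if ¬ w ∈ p.1 then (PySem.Set.add p.1 w, p.2 ++ [w]) else p

def adjPool (adj : PySem.Dict Int (List Int)) : List Int := adj.values.flatten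

theorem mem_getD_adjPool (adj : PySem.Dict Int (List Int)) (u w : Int)
    (hw : w ∈ adj.getD u []) : w ∈ adjPool adj := by
  rcases h : adj.get? u with _ | val
  · rw [PySem.Dict.getD_of_get?_eq_none adj [] h] at hw; cases hw
  · rw [PySem.Dict.getD_of_get?_eq_some adj [] h] at hw
    have hv : val ∈ adj.values := by
      have hi := PySem.Dict.mem_items_of_get?_eq_some adj h
      simp only [PySem.Dict.values]
      exact List.mem_map_of_mem hi
    exact List.mem_flatten.mpr ⟨val, hv, hw⟩

theorem foldB_facts (pool : List Int) :
    ∀ (nl : List Int) (s : List Int × List Int), (∀ w ∈ nl, w ∈ pool) →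
      s.2 <+: (nl.foldl stepB s).2 ∧
      2 * pvCnt pool (nl.foldl stepB s).1 + (nl.foldl stepB s).2.length ≤
        2 * pvCnt pool s.1 + s.2.length := by
  intro nl
  induction nl with
  | nil => intro s _; exact ⟨List.prefix_rfl, le_refl _⟩
  | cons w nl ih =>
    intro s hmem
    simp only [List.foldl_cons]
    by_cases hw : w ∈ s.1
    · have : stepB s w = s := by simp [stepB, hw]
      rw [this]
      exact ih s (fun x hx => hmem x (List.mem_cons_of_mem _ hx))
    · have hstep : stepB s w = (s.1 ++ [w], s.2 ++ [w]) := by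
        simp [stepB, hw, PySem.Set.add, PySem.Set.contains]
      rw [hstep]
      obtain ⟨hpre, hmeas⟩ := ih (s.1 ++ [w], s.2 ++ [w])
        (fun x hx => hmem x (List.mem_cons_of_mem _ hx))
      refine ⟨List.IsPrefix.trans (List.prefix_append s.2 [w]) hpre, ?_⟩
      have := pvCnt_append_lt pool s.1 w (hmem w List.mem_cons_self) hw
      simp only [List.length_append, List.length_cons, List.length_nil] at *
      omega

-- B's while loop with the head pointer over `community`
def bfsAltLoop (adj : PySem.Dict Int (List Int)) (seen community : List Int) (head : Nat) :
    List Int :=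
  if h : head < community.length then
    let u := community[head]
    let t := (adj.getD u []).foldl stepB (seen, community)
    bfsAltLoop adj t.1 t.2 (head + 1)
  else community
termination_by 2 * pvCnt (adjPool adj) seen + (community.length - head)
decreasing_by
  have hf := foldB_facts (adjPool adj) (adj.getD community[head] []) (seen, community)
    (fun w hw => mem_getD_adjPool adj _ w hw)
  have hlen := hf.1.length_le
  have hm := hf.2
  dsimp only at hlen hm
  omega

def bfs_alt (visited : List Int) (e_lst : List (Int × Int)) (v : Int) : List Int :=
  bfsAltLoop (adjBuild e_lst) (PySem.Set.add (PySem.Set.ofList visited) v) [v] 0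

-- ===== PRECONDITION & SPEC =====
def Spec_bfs (visited : List Int) (e_lst : List (Int × Int)) (v : Int) (out : List Int) : Prop := out = bfs_alt visited e_lst v
instance (visited : List Int) (e_lst : List (Int × Int)) (v : Int) (out : List Int) : Decidable (Spec_bfs visited e_lst v out) := by unfold Spec_bfs; infer_instance

-- ===== CLAIM (what is proved, stated in full; the proofs are below) =====
def Claim_equal_bfs : Prop := ∀ (visited : List Int) (e_lst : List (Int × Int)) (v : Int), Dom_bfs visited e_lst v → Spec_bfs visited e_lst v (bfs visited e_lst v)

-- ===== LEMMAS AND PROOFS =====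

theorem adjBuild_getD (u : Int) :
    ∀ (l : List (Int × Int)) (d : PySem.Dict Int (List Int)),
      (l.foldl
        (fun d e => (d.modify e.1 [] (fun l => l ++ [e.2])).modify e.2 [] (fun l => l ++ [e.1]))
        d).getD u [] = d.getD u [] ++ nbrsOf u l := by
  intro l
  induction l with
  | nil => intro d; simp [nbrsOf]
  | cons e l ih =>
    intro d
    simp only [List.foldl_cons]
    rw [ih]
    have hstep :
        ((d.modify e.1 [] (fun l => l ++ [e.2])).modify e.2 [] (fun l => l ++ [e.1])).getD u [] =
          d.getD u [] ++ ((if e.1 = u then [e.2] else []) ++ (if e.2 = u then [e.1] else [])) := by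
      by_cases h1 : e.1 = u <;> by_cases h2 : e.2 = u
      · subst h1
        simp [PySem.Dict.getD_modify, h2]
      · subst h1
        have h2' : ¬ e.1 = e.2 := fun h => h2 h.symm
        simp [PySem.Dict.getD_modify, h2, h2']
      · subst h2
        have h1' : ¬ e.2 = e.1 := fun h => h1 h.symm
        simp [PySem.Dict.getD_modify, h1, h1']
      · have h1' : ¬ u = e.1 := fun h => h1 h.symm
        have h2' : ¬ u = e.2 := fun h => h2 h.symm
        simp [PySem.Dict.getD_modify, h1, h2, h1', h2']
    rw [hstep]
    simp [nbrsOf, List.flatMap_cons]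

theorem parfold :
    ∀ (nl : List Int) (vis q com seen : List Int),
      (∀ x : Int, x ∈ vis ↔ x ∈ seen) →
      (∀ x : Int, x ∈ (nl.foldl stepA (vis, q, com)).1 ↔ x ∈ (nl.foldl stepB (seen, com)).1) ∧
      com <+: (nl.foldl stepB (seen, com)).2 ∧
      (nl.foldl stepA (vis, q, com)).2.2 = (nl.foldl stepB (seen, com)).2 ∧
      (nl.foldl stepA (vis, q, com)).2.1 = q ++ (nl.foldl stepB (seen, com)).2.drop com.length := by
  intro nl
  induction nl with
  | nil =>
    intro vis q com seen hmem
    refine ⟨hmem, List.prefix_rfl, rfl, ?_⟩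
    simp [List.drop_length]
  | cons w nl ih =>
    intro vis q com seen hmem
    simp only [List.foldl_cons]
    by_cases hw : w ∈ vis
    · have hws : w ∈ seen := (hmem w).mp hw
      have ha : stepA (vis, q, com) w = (vis, q, com) := by simp [stepA, hw]
      have hb : stepB (seen, com) w = (seen, com) := by simp [stepB, hws]
      rw [ha, hb]
      exact ih vis q com seen hmem
    · have hws : ¬ w ∈ seen := fun h => hw ((hmem w).mpr h)
      have ha : stepA (vis, q, com) w = (vis ++ [w], q ++ [w], com ++ [w]) := by simp [stepA, hw]
      have hb : stepB (seen, com) w = (seen ++ [w], com ++ [w]) := by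
        simp [stepB, hws, PySem.Set.add, PySem.Set.contains]
      rw [ha, hb]
      have hmem' : ∀ x : Int, x ∈ vis ++ [w] ↔ x ∈ seen ++ [w] := by
        intro x; simp [List.mem_append, hmem x]
      obtain ⟨i1, i2, i3, i4⟩ := ih (vis ++ [w]) (q ++ [w]) (com ++ [w]) (seen ++ [w]) hmem'
      refine ⟨i1, List.IsPrefix.trans (List.prefix_append com [w]) i2, i3, ?_⟩
      obtain ⟨t, ht⟩ := i2
      rw [i4, ← ht]
      have hd1 : ((com ++ [w]) ++ t).drop (com ++ [w]).length = t := List.drop_left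
      have hd2 : ((com ++ [w]) ++ t).drop com.length = [w] ++ t := by
        rw [List.append_assoc]
        exact List.drop_left
      rw [hd1, hd2]
      simp [List.append_assoc]

theorem loops_agree (e_lst : List (Int × Int)) (vis q com : List Int) :
    ∀ (seen : List Int) (head : Nat),
      (∀ x : Int, x ∈ vis ↔ x ∈ seen) → q = com.drop head → head ≤ com.length →
      bfsLoop e_lst vis q com = bfsAltLoop (adjBuild e_lst) seen com head := by
  induction vis, q, com using bfsLoop.induct e_lst with
  | case1 vis com =>
    intro seen head hmem hq hhead
    have hge : com.length ≤ head := List.drop_eq_nil_iff.mp hq.symm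
    rw [bfsLoop, bfsAltLoop]
    rw [dif_neg (by omega)]
  | case2 vis com v qt s ih =>
    intro seen head hmem hq hhead
    have hlt : head < com.length := by
      by_contra hc
      push_neg at hc
      rw [List.drop_eq_nil_of_le hc] at hq
      exact List.cons_ne_nil _ _ hq
    have hu : com[head]'hlt = v := by
      have h0 : (com.drop head)[0]? = com[head]? := by
        rw [List.getElem?_drop]; norm_num
      rw [← hq] at h0
      simp only [List.getElem?_cons_zero] at h0
      rw [List.getElem?_eq_getElem hlt] at h0
      exact ((Option.some.injEq _ _).mp h0).symm
    have hqt : qt = com.drop (head + 1) := by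
      have h1 : (com.drop head).tail = com.drop (head + 1) := List.tail_drop
      rw [← hq] at h1
      simpa using h1
    rw [bfsLoop, bfsAltLoop, dif_pos hlt]
    have hadj : (adjBuild e_lst).getD (com[head]'hlt) [] = nbrsOf v e_lst := by
      rw [hu]
      have h2 := adjBuild_getD v e_lst PySem.Dict.empty
      simpa [adjBuild, PySem.Dict.getD_empty] using h2
    obtain ⟨p1, p2, p3, p4⟩ := parfold (nbrsOf v e_lst) vis qt com seen hmem
    obtain ⟨t, ht⟩ := p2
    have hlenB : com.length ≤ ((nbrsOf v e_lst).foldl stepB (seen, com)).2.length :=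
      List.IsPrefix.length_le ⟨t, ht⟩
    simp only [hadj, foldA_eq]
    have hs : s = (nbrsOf v e_lst).foldl stepA (vis, qt, com) :=
      (List.foldl_attach).trans (foldA_eq v e_lst _)
    rw [← hs] at p1 p3 p4 ⊢
    rw [← p3]
    apply ih
    · exact p1
    · rw [p4, p3, hqt, ← ht,
        List.drop_append_of_le_length (show head + 1 ≤ com.length by omega), List.drop_left]
    · rw [p3]; omega

-- ===== VERDICT (by name: the statement is the Claim_ definition above) =====
theorem bfs_spec : Claim_equal_bfs := by
  intro visited e_lst v _
  unfold Spec_bfs bfs bfs_alt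
  apply loops_agree
  · intro x
    simp [PySem.Set.mem_add, PySem.Set.mem_ofList, List.mem_append]
  · rfl
  · simp
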